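-- pv_equiv track=rewrite | github.com/inria-paris-robotics-lab/prl_hpp_tsid | prl_tsid/src/prl_tsid/tsid_commander.py | _getJointIndexes
-- ===== SOURCE A (Python) =====
-- def _getJointIndexes(jointSubSet, jointSet, strict = True):
--     indexes = []
--     for sub_joint in jointSubSet:
--         for i, joint in enumerate(jointSet):
--             if sub_joint == joint:
--                 indexes.append(i)
--                 break #next joint
--     assert (not strict) or (len(indexes)==len(jointSubSet)), "Not all joint from the subset could be found in the set for :" + str(jointSubSet) + "\n in :" + str(jointSet)
--     return indexes
-- ===== SOURCE B (Python) =====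
-- def _getJointIndexes(jointSubSet, jointSet, strict = True):
--     # sort the (name, index) pairs of jointSet once, then binary-search each subset
--     # name; ties on equal names are ordered by index, so a hit is the first occurrence
--     pairs = sorted([(name, i) for i, name in enumerate(jointSet)])
--     indexes = []
--     for j in jointSubSet:
--         lo, hi = 0, len(pairs)
--         while lo < hi:
--             mid = (lo + hi) // 2
--             if pairs[mid][0] < j:
--                 lo = mid + 1
--             else:
--                 hi = mid
--         if lo < len(pairs) and pairs[lo][0] == j:
--             indexes.append(pairs[lo][1])
--     assert (not strict) or (len(indexes)==len(jointSubSet)), "Not all joint from the subset could be found in the set for :" + str(jointSubSet) + "\n in :" + str(jointSet)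
--     return indexes
-- ===== Notes on version B (the rewrite author's own statement) =====
-- stated objective: faster
-- what changed: B sorts the (name, index) pairs of jointSet once and binary-searches each subset name (stable tie on index gives the first occurrence), replacing A's linear rescan of jointSet per subset element.
import Mathlib
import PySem

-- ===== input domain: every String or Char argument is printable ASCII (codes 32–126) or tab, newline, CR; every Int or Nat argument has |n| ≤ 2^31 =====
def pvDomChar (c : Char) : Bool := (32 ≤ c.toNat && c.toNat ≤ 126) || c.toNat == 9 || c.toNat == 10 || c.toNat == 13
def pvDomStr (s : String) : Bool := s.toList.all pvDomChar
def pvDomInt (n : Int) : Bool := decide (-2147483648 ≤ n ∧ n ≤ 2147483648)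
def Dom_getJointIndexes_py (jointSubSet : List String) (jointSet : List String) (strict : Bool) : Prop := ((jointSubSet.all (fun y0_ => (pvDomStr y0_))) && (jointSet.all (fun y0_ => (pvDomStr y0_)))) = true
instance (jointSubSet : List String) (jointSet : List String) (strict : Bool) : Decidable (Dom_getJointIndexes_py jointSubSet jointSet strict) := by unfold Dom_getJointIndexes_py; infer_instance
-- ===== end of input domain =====

-- B sorts the (name, index) pairs of jointSet once and binary-searches each subset name,
-- replacing A's linear rescan of jointSet per subset element (return value only; no mutation).

-- ===== PORT A =====
-- inner 'for i, joint in enumerate(jointSet): if sub_joint == joint: indexes.append(i); break'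
def pvInnerA (sub : String) : List (Int × String) → List Int → List Int
  | [], acc => acc
  | (i, joint) :: rest, acc => if sub == joint then acc ++ [i] else pvInnerA sub rest acc

def getJointIndexes_py (jointSubSet : List String) (jointSet : List String) (strict : Bool) : List Int :=
  jointSubSet.foldl (fun acc sub => pvInnerA sub (PySem.List.enumerate jointSet 0) acc) []

-- ===== PORT B =====
-- 'pairs = sorted([(name, i) for i, name in enumerate(jointSet)])'  (tuple comparison = name, then index)
def pvPairs (jointSet : List String) : List (String × Int) :=
  PySem.List.sorted2 ((PySem.List.enumerate jointSet 0).map (fun p => (p.2, p.1))) Prod.fst Prod.snd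

-- 'lo, hi = 0, len(pairs); while lo < hi: mid = (lo+hi)//2; if pairs[mid][0] < j: lo = mid+1 else: hi = mid'
def pvBisect (ps : List (String × Int)) (j : String) (lo hi : Int) : Int :=
  if h : lo < hi then
    let mid := PySem.Int.floordiv (lo + hi) 2
    if (PySem.List.pyGetD ps mid ("", 0)).1 < j then pvBisect ps j (mid + 1) hi
    else pvBisect ps j lo mid
  else lo
termination_by (hi - lo).toNat
decreasing_by
  · have hb := PySem.Int.floordiv_two_mid_bounds (lo := lo) (hi := hi) (le_of_lt h)
    have hlt : PySem.Int.floordiv (lo + hi) 2 < hi := by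
      rw [PySem.Int.floordiv_lt_iff_lt_mul (by omega)]; omega
    omega
  · have hb := PySem.Int.floordiv_two_mid_bounds (lo := lo) (hi := hi) (le_of_lt h)
    have hlt : PySem.Int.floordiv (lo + hi) 2 < hi := by
      rw [PySem.Int.floordiv_lt_iff_lt_mul (by omega)]; omega
    omega

-- 'for j in jointSubSet: …lo = bisect…; if lo < len(pairs) and pairs[lo][0] == j: indexes.append(pairs[lo][1])'
def getJointIndexes_py_alt (jointSubSet : List String) (jointSet : List String) (strict : Bool) : List Int :=
  let pairs := pvPairs jointSet
  jointSubSet.foldl (fun acc j =>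
    let lo := pvBisect pairs j 0 (PySem.List.len pairs)
    if lo < PySem.List.len pairs ∧ (PySem.List.pyGetD pairs lo ("", 0)).1 = j
    then acc ++ [(PySem.List.pyGetD pairs lo ("", 0)).2] else acc) []

-- ===== PRECONDITION & SPEC =====
-- A's assert raises AssertionError iff strict and some subset element is absent from jointSet; exactly those inputs are excluded.
def Pre_getJointIndexes_py (jointSubSet : List String) (jointSet : List String) (strict : Bool) : Prop :=
  strict = true → ∀ s ∈ jointSubSet, s ∈ jointSet
instance (jointSubSet : List String) (jointSet : List String) (strict : Bool) : Decidable (Pre_getJointIndexes_py jointSubSet jointSet strict) := by unfold Pre_getJointIndexes_py; infer_instance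

def pvWitness_getJointIndexes_py : List String × List String × Bool := (["a", "c"], ["a", "b", "c"], true)

def Spec_getJointIndexes_py (jointSubSet : List String) (jointSet : List String) (strict : Bool) (out : List Int) : Prop := out = getJointIndexes_py_alt jointSubSet jointSet strict
instance (jointSubSet : List String) (jointSet : List String) (strict : Bool) (out : List Int) : Decidable (Spec_getJointIndexes_py jointSubSet jointSet strict out) := by unfold Spec_getJointIndexes_py; infer_instance

-- ===== CLAIM (what is proved, stated in full; the proofs are below) =====
def Claim_equal_getJointIndexes_py : Prop := ∀ (jointSubSet : List String) (jointSet : List String) (strict : Bool), Dom_getJointIndexes_py jointSubSet jointSet strict → Pre_getJointIndexes_py jointSubSet jointSet strict → Spec_getJointIndexes_py jointSubSet jointSet strict (getJointIndexes_py jointSubSet jointSet strict)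

-- ===== LEMMAS AND PROOFS =====

-- first-match scan of an enumerated list, as an Option (characterises A's inner loop)
def pvScanOpt (sub : String) : List (Int × String) → Option Int
  | [] => none
  | (i, joint) :: rest => if sub == joint then some i else pvScanOpt sub rest

theorem pvInnerA_eq_scan (sub : String) (e : List (Int × String)) (acc : List Int) :
    pvInnerA sub e acc = acc ++ (pvScanOpt sub e).toList := by
  induction e generalizing acc with
  | nil => simp [pvInnerA, pvScanOpt]
  | cons p rest ih =>
    obtain ⟨i, j⟩ := p
    by_cases h : sub == j
    · simp [pvInnerA, pvScanOpt, h]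
    · simp only [pvInnerA, pvScanOpt, h, Bool.false_eq_true, if_false, ih]

theorem foldl_append_toList {α β : Type} (g : α → Option β) (l : List α) (acc : List β) :
    l.foldl (fun acc s => acc ++ (g s).toList) acc = acc ++ l.filterMap g := by
  induction l generalizing acc with
  | nil => simp
  | cons x xs ih =>
    simp only [List.foldl_cons, ih, List.filterMap_cons]
    cases h : g x <;> simp [h]

-- Python list indexing at a provably in-range nonnegative index
theorem pvGetDElem (ps : List (String × Int)) (mid : Int) (h0 : 0 ≤ mid) (h1 : mid.toNat < ps.length) :
    PySem.List.pyGetD ps mid ("", 0) = ps[mid.toNat] := by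
  have h2 := PySem.List.pyGetD_natCast ps mid.toNat ("", 0)
  rw [Int.toNat_of_nonneg h0] at h2
  rw [List.getD_eq_getElem _ _ h1] at h2
  exact h2

-- pvScanOpt finds no match iff j never occurs as a name
theorem pvScanOpt_eq_none_iff (j : String) (e : List (Int × String)) :
    pvScanOpt j e = none ↔ ∀ p ∈ e, p.2 ≠ j := by
  induction e with
  | nil => simp [pvScanOpt]
  | cons p rest ih =>
    obtain ⟨i, n⟩ := p
    by_cases h : j = n
    · subst h; simp [pvScanOpt]
    · simp [pvScanOpt, beq_iff_eq, h, ih, Ne.symm h]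

-- pvScanOpt returns a member with minimal first component (on fst-strictly-increasing lists)
theorem pvScanOpt_eq_some (j : String) (e : List (Int × String)) (i0 : Int)
    (hs : e.Pairwise (fun p q => p.1 < q.1)) (h : pvScanOpt j e = some i0) :
    (i0, j) ∈ e ∧ ∀ p ∈ e, p.2 = j → i0 ≤ p.1 := by
  induction e with
  | nil => simp [pvScanOpt] at h
  | cons p rest ih =>
    obtain ⟨i, n⟩ := p
    by_cases hj : j = n
    · subst hj
      simp [pvScanOpt] at h
      subst h
      refine ⟨List.mem_cons_self, ?_⟩
      intro p hp _
      rcases List.mem_cons.1 hp with h1 | h1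
      · simp [h1]
      · exact le_of_lt ((List.pairwise_cons.1 hs).1 p h1)
    · simp only [pvScanOpt, beq_iff_eq, hj, if_false] at h
      obtain ⟨hmem, hmin⟩ := ih (List.pairwise_cons.1 hs).2 h
      refine ⟨List.mem_cons_of_mem _ hmem, ?_⟩
      intro q hq hqj
      rcases List.mem_cons.1 hq with h1 | h1
      · exfalso; rw [h1] at hqj; exact hj hqj.symm
      · exact hmin q h1 hqj

-- B's sort of Python tuples is the PySem sort under the lexicographic key
theorem pvSorted2_eq_sorted_lex (xs : List (String × Int)) :
    PySem.List.sorted2 xs Prod.fst Prod.snd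
      = PySem.List.sorted xs (fun p => toLex (p.1, p.2)) := by
  have hfg : (fun a b : String × Int => decide (a.1 < b.1) || (!decide (b.1 < a.1) && decide (a.2 < b.2)))
      = fun a b : String × Int => decide (toLex (a.1, a.2) < toLex (b.1, b.2)) := by
    funext a b
    by_cases h1 : a.1 < b.1
    · simp [h1, Prod.Lex.lt_iff]
    · by_cases h2 : b.1 < a.1
      · simp [h1, h2, Prod.Lex.lt_iff, ne_of_gt h2]
      · have he : a.1 = b.1 := le_antisymm (not_lt.1 h2) (not_lt.1 h1)
        by_cases h3 : a.2 < b.2 <;> simp [h3, Prod.Lex.lt_iff, he]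
  simp only [PySem.List.sorted2, PySem.List.sorted, Bool.false_eq_true, if_false]
  rw [hfg]

theorem pvPairs_perm (jointSet : List String) :
    (pvPairs jointSet).Perm ((PySem.List.enumerate jointSet 0).map (fun p => (p.2, p.1))) :=
  PySem.List.sorted2_perm _ _ _ _

theorem pvPairs_pairwise (jointSet : List String) :
    (pvPairs jointSet).Pairwise (fun a b => toLex (a.1, a.2) ≤ toLex (b.1, b.2)) := by
  rw [pvPairs, pvSorted2_eq_sorted_lex]
  exact PySem.List.sorted_pairwise _ _

-- binary-search correctness on a fst-sorted list
theorem pvBisect_spec (ps : List (String × Int)) (j : String)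
    (hs : ps.Pairwise (fun a b => a.1 ≤ b.1)) :
    ∀ (n : Nat) (lo hi : Int), (hi - lo).toNat = n → 0 ≤ lo → lo ≤ hi → hi ≤ PySem.List.len ps →
    (∀ (k : Nat) (hk : k < ps.length), (k : Int) < lo → (ps[k]).1 < j) →
    (∀ (k : Nat) (hk : k < ps.length), hi ≤ (k : Int) → j ≤ (ps[k]).1) →
    0 ≤ pvBisect ps j lo hi ∧ pvBisect ps j lo hi ≤ PySem.List.len ps ∧
    (∀ (k : Nat) (hk : k < ps.length), (k : Int) < pvBisect ps j lo hi → (ps[k]).1 < j) ∧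
    (∀ (k : Nat) (hk : k < ps.length), pvBisect ps j lo hi ≤ (k : Int) → j ≤ (ps[k]).1) := by
  intro n
  induction n using Nat.strong_induction_on with
  | _ n ih =>
    intro lo hi hn h0 hlohi hhil hbelow habove
    have hlen : PySem.List.len ps = (ps.length : Int) := PySem.List.len_eq ps
    rw [pvBisect]
    by_cases h : lo < hi
    · rw [dif_pos h]
      simp only []
      have hmb := PySem.Int.floordiv_two_mid_bounds (le_of_lt h)
      have hmlt : PySem.Int.floordiv (lo + hi) 2 < hi := by
        rw [PySem.Int.floordiv_lt_iff_lt_mul (by omega)]; omega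
      set mid := PySem.Int.floordiv (lo + hi) 2 with hmiddef
      have hmidnn : 0 ≤ mid := le_trans h0 hmb.1
      have hmidlen : mid.toNat < ps.length := by omega
      rw [pvGetDElem ps mid hmidnn hmidlen]
      by_cases hc : (ps[mid.toNat]).1 < j
      · rw [if_pos hc]
        apply ih (hi - (mid + 1)).toNat (by omega) (mid + 1) hi rfl (by omega) (by omega) hhil ?_ habove
        intro k hk hklt
        rcases Nat.lt_or_ge k mid.toNat with hkm | hkm
        · exact lt_of_le_of_lt (List.pairwise_iff_getElem.1 hs k mid.toNat hk hmidlen hkm) hc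
        · have hkm2 : k = mid.toNat := by omega
          simp only [hkm2]; exact hc
      · rw [if_neg hc]
        apply ih (mid - lo).toNat (by omega) lo mid rfl h0 hmb.1 (by omega) hbelow ?_
        intro k hk hkge
        rcases Nat.lt_or_ge mid.toNat k with hkm | hkm
        · exact le_trans (not_lt.1 hc) (List.pairwise_iff_getElem.1 hs mid.toNat k hmidlen hk hkm)
        · have hkm2 : k = mid.toNat := by omega
          simp only [hkm2]; exact not_lt.1 hc
    · rw [dif_neg h]
      have heq : lo = hi := by omega
      exact ⟨h0, by omega, hbelow, fun k hk hge => habove k hk (by omega)⟩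

-- the whole per-element lookup of B equals A's first-match scan
theorem pvLookup_eq_scan (jointSet : List String) (j : String) (r : Int)
    (hr : r = pvBisect (pvPairs jointSet) j 0 (PySem.List.len (pvPairs jointSet))) :
    (if r < PySem.List.len (pvPairs jointSet) ∧ (PySem.List.pyGetD (pvPairs jointSet) r ("", 0)).1 = j
     then some (PySem.List.pyGetD (pvPairs jointSet) r ("", 0)).2 else none)
      = pvScanOpt j (PySem.List.enumerate jointSet 0) := by
  have hperm := pvPairs_perm jointSet
  have hlex := pvPairs_pairwise jointSet
  set ps := pvPairs jointSet with hps
  have hlen : PySem.List.len ps = (ps.length : Int) := PySem.List.len_eq ps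
  have hfst : ps.Pairwise (fun a b => a.1 ≤ b.1) := by
    refine hlex.imp ?_
    intro a b hab
    rcases Prod.Lex.le_iff.1 hab with h | h
    · exact le_of_lt (by simpa using h)
    · exact le_of_eq (by simpa using h.1)
  obtain ⟨hr0, hrlen, hbel, habv⟩ :=
    pvBisect_spec ps j hfst ((PySem.List.len ps - 0).toNat) 0 (PySem.List.len ps) rfl le_rfl
      (by omega) le_rfl
      (fun k hk hlt => absurd hlt (by omega))
      (fun k hk hge => absurd hge (by omega))
  rw [← hr] at hr0 hrlen hbel habv
  have hmem : ∀ q : String × Int, q ∈ ps ↔ (q.2, q.1) ∈ PySem.List.enumerate jointSet 0 := by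
    intro q
    rw [hperm.mem_iff, List.mem_map]
    constructor
    · rintro ⟨⟨a, b⟩, hp, rfl⟩; simpa using hp
    · intro hq; exact ⟨(q.2, q.1), hq, by simp⟩
  cases hscan : pvScanOpt j (PySem.List.enumerate jointSet 0) with
  | none =>
    rw [if_neg]
    rintro ⟨hrlt, hreq⟩
    have hnone := (pvScanOpt_eq_none_iff j _).1 hscan
    have hrn : r.toNat < ps.length := by omega
    rw [pvGetDElem ps r hr0 hrn] at hreq
    have hm : (ps[r.toNat]) ∈ ps := List.getElem_mem _
    exact hnone _ ((hmem _).1 hm) (by simpa using hreq)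
  | some i0 =>
    obtain ⟨hm, hmin⟩ := pvScanOpt_eq_some j _ i0 (PySem.List.pairwise_lt_enumerate _ _) hscan
    have hminps : ∀ q ∈ ps, q.1 = j → i0 ≤ q.2 := by
      intro q hq hq1
      have := hmin (q.2, q.1) ((hmem q).1 hq) (by simpa using hq1)
      simpa using this
    have hjmem : (j, i0) ∈ ps := (hmem (j, i0)).2 (by simpa using hm)
    obtain ⟨k0, hk0l, hk0⟩ := List.getElem_of_mem hjmem
    have hrk0 : r.toNat ≤ k0 := by
      by_contra hlt
      have hlt2 : k0 < r.toNat := Nat.lt_of_not_le hlt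
      have hb := hbel k0 hk0l (by omega)
      rw [hk0] at hb
      exact lt_irrefl _ hb
    have hrlen' : r.toNat < ps.length := lt_of_le_of_lt hrk0 hk0l
    have hrlt : r < PySem.List.len ps := by omega
    have hgetr := pvGetDElem ps r hr0 hrlen'
    have hge : j ≤ (ps[r.toNat]).1 := habv r.toNat hrlen' (by omega)
    have hle : (ps[r.toNat]).1 ≤ j := by
      rcases eq_or_lt_of_le hrk0 with heq | hlt
      · simp only [heq, hk0]; exact le_rfl
      · have := List.pairwise_iff_getElem.1 hfst r.toNat k0 hrlen' hk0l hlt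
        rw [hk0] at this; exact this
    have hfstj : (ps[r.toNat]).1 = j := le_antisymm hle hge
    rw [if_pos ⟨hrlt, by rw [hgetr]; exact hfstj⟩, hgetr]
    have h1 : i0 ≤ (ps[r.toNat]).2 := hminps _ (List.getElem_mem _) hfstj
    have h2 : (ps[r.toNat]).2 ≤ i0 := by
      rcases eq_or_lt_of_le hrk0 with heq | hlt
      · simp only [heq, hk0]; exact le_rfl
      · have hlex2 := List.pairwise_iff_getElem.1 hlex r.toNat k0 hrlen' hk0l hlt
        rw [hk0] at hlex2
        rcases Prod.Lex.le_iff.1 hlex2 with hlt' | hand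
        · exfalso
          simp only [ofLex_toLex] at hlt'
          rw [hfstj] at hlt'
          exact lt_irrefl _ hlt'
        · simpa using hand.2
    exact congrArg some (le_antisymm h2 h1)

theorem pvFoldB_eq (jointSet : List String) (l : List String) (acc : List Int) :
    l.foldl (fun acc j =>
        if pvBisect (pvPairs jointSet) j 0 (PySem.List.len (pvPairs jointSet)) < PySem.List.len (pvPairs jointSet) ∧
            (PySem.List.pyGetD (pvPairs jointSet) (pvBisect (pvPairs jointSet) j 0 (PySem.List.len (pvPairs jointSet))) ("", 0)).1 = j
        then acc ++ [(PySem.List.pyGetD (pvPairs jointSet) (pvBisect (pvPairs jointSet) j 0 (PySem.List.len (pvPairs jointSet))) ("", 0)).2]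
        else acc) acc
      = acc ++ l.filterMap (fun j => pvScanOpt j (PySem.List.enumerate jointSet 0)) := by
  induction l generalizing acc with
  | nil => simp
  | cons x xs ih =>
    have hx := pvLookup_eq_scan jointSet x _ rfl
    simp only [List.foldl_cons, List.filterMap_cons]
    by_cases hc : pvBisect (pvPairs jointSet) x 0 (PySem.List.len (pvPairs jointSet)) < PySem.List.len (pvPairs jointSet) ∧
        (PySem.List.pyGetD (pvPairs jointSet) (pvBisect (pvPairs jointSet) x 0 (PySem.List.len (pvPairs jointSet))) ("", 0)).1 = x
    · rw [if_pos hc, ih, ← hx, if_pos hc]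
      simp
    · rw [if_neg hc, ih, ← hx, if_neg hc]

-- ===== VERDICT (by name: the statement is the Claim_ definition above) =====
theorem getJointIndexes_py_spec : Claim_equal_getJointIndexes_py := by
  intro jointSubSet jointSet strict _ _
  unfold Spec_getJointIndexes_py getJointIndexes_py getJointIndexes_py_alt
  have hA : ∀ (acc : List Int) (sub : String),
      pvInnerA sub (PySem.List.enumerate jointSet 0) acc
        = acc ++ (pvScanOpt sub (PySem.List.enumerate jointSet 0)).toList :=
    fun acc sub => pvInnerA_eq_scan sub _ acc
  simp only [hA, foldl_append_toList]
  rw [pvFoldB_eq jointSet jointSubSet []]
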